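-- pv_equiv track=rewrite | github.com/mikkorekstad/DiffParser | src/diffparser/diffparser.py | separate_buggy_and_patched
-- ===== SOURCE A (Python) =====
-- def separate_buggy_and_patched(file_split):
--     # Define empty strings for the code-snippets
--     buggy_code = ''
--     patched_code = ''
--
--     buggy_count = 0
--     patched_count = 0
--
--     # Iterate through each line of the diff, and assign the lines to the correct variable
--     for line in file_split.splitlines():
--         if line[0] == "-":
--             buggy_code += (line[1:] + "\n")
--             buggy_count += 1
--         elif line[0] == "+":
--             patched_code += (line[1:] + "\n")
--             patched_count += 1
--         else:
--             buggy_code += (line + "\n")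
--             patched_code += (line + "\n")
--     return buggy_code, patched_code
-- ===== SOURCE B (Python) =====
-- def _emit(marker, line):
--     return (line[1:] if line.startswith(marker) else line) + "\n"
--
--
-- def separate_buggy_and_patched(file_split):
--     lines = file_split.splitlines()
--     buggy_code = ''.join(_emit('-', line) for line in lines
--                          if not line.startswith('+'))
--     patched_code = ''.join(_emit('+', line) for line in lines
--                            if not line.startswith('-'))
--     return buggy_code, patched_code
-- ===== Notes on version B (the rewrite author's own statement) =====
-- stated objective: simpler
-- what changed: Replaces A's single branching accumulator loop (with dead counters) by two independent filter-and-join passes, one per output string.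
import Mathlib
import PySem

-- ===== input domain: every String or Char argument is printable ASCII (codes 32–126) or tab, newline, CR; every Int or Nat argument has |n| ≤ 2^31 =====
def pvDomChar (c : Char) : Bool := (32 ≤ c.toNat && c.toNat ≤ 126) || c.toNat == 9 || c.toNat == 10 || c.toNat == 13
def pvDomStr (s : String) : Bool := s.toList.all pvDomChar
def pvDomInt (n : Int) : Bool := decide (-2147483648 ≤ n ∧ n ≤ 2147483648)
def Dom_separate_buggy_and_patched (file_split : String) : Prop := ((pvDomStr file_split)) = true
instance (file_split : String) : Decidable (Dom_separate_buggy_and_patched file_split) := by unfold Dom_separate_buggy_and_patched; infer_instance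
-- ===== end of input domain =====

-- B replaces A's single branching accumulator loop by two independent filter-and-join passes (objective: simpler).

-- ===== PORT A =====
-- A's loop body: one step per line, state (buggy_code, patched_code, buggy_count, patched_count)
def pvStepA (st : String × String × Int × Int) (line : String) : String × String × Int × Int :=
  if PySem.Str.pyGet? line 0 = some '-' then
    (st.1 ++ PySem.Str.slice line (some 1) none ++ "\n", st.2.1, st.2.2.1 + 1, st.2.2.2)
  else if PySem.Str.pyGet? line 0 = some '+' then
    (st.1, st.2.1 ++ PySem.Str.slice line (some 1) none ++ "\n", st.2.2.1, st.2.2.2 + 1)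
  else
    (st.1 ++ line ++ "\n", st.2.1 ++ line ++ "\n", st.2.2.1, st.2.2.2)

def separate_buggy_and_patched (file_split : String) : String × String :=
  let r := (PySem.Str.splitlines file_split).foldl pvStepA ("", "", 0, 0)
  (r.1, r.2.1)

-- ===== PORT B =====
-- Source B's _emit helper
def pvEmit (marker : String) (line : String) : String :=
  (if PySem.Str.startswith line marker then PySem.Str.slice line (some 1) none else line) ++ "\n"

def separate_buggy_and_patched_alt (file_split : String) : String × String :=
  let lines := PySem.Str.splitlines file_split
  (PySem.Str.join "" ((lines.filter (fun l => ! PySem.Str.startswith l "+")).map (pvEmit "-")),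
   PySem.Str.join "" ((lines.filter (fun l => ! PySem.Str.startswith l "-")).map (pvEmit "+")))

-- ===== PRECONDITION & SPEC =====
-- Pre_ excludes exactly the inputs whose diff contains an empty line: A evaluates line[0] there and raises IndexError.
def Pre_separate_buggy_and_patched (file_split : String) : Prop :=
  ∀ l ∈ PySem.Str.splitlines file_split, l ≠ ""

instance (file_split : String) : Decidable (Pre_separate_buggy_and_patched file_split) := by
  unfold Pre_separate_buggy_and_patched; infer_instance

def pvWitness_separate_buggy_and_patched : String := "-a\n+b\nc"

def Spec_separate_buggy_and_patched (file_split : String) (out : String × String) : Prop := out = separate_buggy_and_patched_alt file_split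
instance (file_split : String) (out : String × String) : Decidable (Spec_separate_buggy_and_patched file_split out) := by unfold Spec_separate_buggy_and_patched; infer_instance

-- ===== CLAIM (what is proved, stated in full; the proofs are below) =====
def Claim_equal_separate_buggy_and_patched : Prop := ∀ (file_split : String), Dom_separate_buggy_and_patched file_split → Pre_separate_buggy_and_patched file_split → Spec_separate_buggy_and_patched file_split (separate_buggy_and_patched file_split)

-- ===== LEMMAS AND PROOFS =====

theorem pvStrAppendAssoc (a b c : String) : a ++ b ++ c = a ++ (b ++ c) := by
  apply String.toList_injective; simp

theorem pvStrEmptyAppend (a : String) : "" ++ a = a := by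
  apply String.toList_injective; simp

theorem pvJoinEmptyNil : PySem.Str.join "" ([] : List String) = "" := by
  apply String.toList_injective
  simp [PySem.Str.toList_join, PySem.Chars.join_nil]

theorem pvJoinEmptyCons (x : String) (xs : List String) :
    PySem.Str.join "" (x :: xs) = x ++ PySem.Str.join "" xs := by
  apply String.toList_injective
  cases xs with
  | nil => simp [PySem.Str.toList_join, PySem.Chars.join_singleton, PySem.Chars.join_nil]
  | cons y ys => simp [PySem.Str.toList_join, PySem.Chars.join_cons_cons]

theorem pvHeadCases (l : String) (h : l ≠ "") : ∃ c cs, l.toList = c :: cs := by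
  cases hl : l.toList with
  | nil => exact absurd (String.toList_injective (by simpa using hl)) h
  | cons c cs => exact ⟨c, cs, rfl⟩

theorem pvStartswithHead (c d : Char) (cs : List Char) :
    PySem.Chars.startswith (c :: cs) [d] = (c == d) := by
  by_cases hcd : c = d
  · subst hcd; simp [PySem.Chars.startswith_iff]
  · have hb : (c == d) = false := beq_eq_false_iff_ne.mpr hcd
    rw [hb, ← Bool.not_eq_true, PySem.Chars.startswith_iff, List.cons_prefix_cons]
    rintro ⟨hdc, -⟩
    exact hcd hdc.symm

theorem pvStartswithVal (l : String) (c : Char) (cs : List Char) (hl : l.toList = c :: cs)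
    (d : Char) (m : String) (hm : m.toList = [d]) :
    PySem.Str.startswith l m = (c == d) := by
  rw [PySem.Str.startswith_eq, hl, hm, pvStartswithHead]

theorem pvGetHead (l : String) (c : Char) (cs : List Char) (hl : l.toList = c :: cs) :
    PySem.Str.pyGet? l 0 = some c := by
  have h0 : PySem.Str.pyGet? l ((0 : Nat) : Int) = l.toList[(0 : Nat)]? :=
    PySem.Str.pyGet?_natCast l 0
  rw [hl] at h0
  simpa using h0

theorem pvLoop (ls : List String) (h : ∀ l ∈ ls, l ≠ "") (b p : String) (bc pc : Int) :
    (List.foldl pvStepA (b, p, bc, pc) ls).1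
      = b ++ PySem.Str.join "" ((ls.filter (fun l => ! PySem.Str.startswith l "+")).map (pvEmit "-"))
  ∧ (List.foldl pvStepA (b, p, bc, pc) ls).2.1
      = p ++ PySem.Str.join "" ((ls.filter (fun l => ! PySem.Str.startswith l "-")).map (pvEmit "+")) := by
  induction ls generalizing b p bc pc with
  | nil => simp [pvJoinEmptyNil]
  | cons l ls ih =>
    obtain ⟨c, cs, hl⟩ := pvHeadCases l (h l (by simp))
    have hrest : ∀ x ∈ ls, x ≠ "" := fun x hx => h x (by simp [hx])
    have hget := pvGetHead l c cs hl
    have hsp : PySem.Str.startswith l "+" = (c == '+') := pvStartswithVal l c cs hl '+' "+" (by decide)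
    have hsm : PySem.Str.startswith l "-" = (c == '-') := pvStartswithVal l c cs hl '-' "-" (by decide)
    by_cases hc1 : c = '-'
    · subst hc1
      have hfp : (l :: ls).filter (fun x => ! PySem.Str.startswith x "+")
          = l :: ls.filter (fun x => ! PySem.Str.startswith x "+") := by
        rw [List.filter_cons, hsp]; simp
      have hfm : (l :: ls).filter (fun x => ! PySem.Str.startswith x "-")
          = ls.filter (fun x => ! PySem.Str.startswith x "-") := by
        rw [List.filter_cons, hsm]; simp
      have hstep : pvStepA (b, p, bc, pc) l
          = (b ++ PySem.Str.slice l (some 1) none ++ "\n", p, bc + 1, pc) := by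
        unfold pvStepA; rw [hget]; simp
      have he : pvEmit "-" l = PySem.Str.slice l (some 1) none ++ "\n" := by
        unfold pvEmit; rw [hsm]; simp
      obtain ⟨ih1, ih2⟩ := ih hrest (b ++ PySem.Str.slice l (some 1) none ++ "\n") p (bc + 1) pc
      rw [List.foldl_cons, hstep]
      exact ⟨by rw [ih1, hfp, List.map_cons, pvJoinEmptyCons, he]; simp [pvStrAppendAssoc],
             by rw [ih2, hfm]⟩
    · by_cases hc2 : c = '+'
      · subst hc2
        have hfp : (l :: ls).filter (fun x => ! PySem.Str.startswith x "+")
            = ls.filter (fun x => ! PySem.Str.startswith x "+") := by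
          rw [List.filter_cons, hsp]; simp
        have hfm : (l :: ls).filter (fun x => ! PySem.Str.startswith x "-")
            = l :: ls.filter (fun x => ! PySem.Str.startswith x "-") := by
          rw [List.filter_cons, hsm]; simp
        have hstep : pvStepA (b, p, bc, pc) l
            = (b, p ++ PySem.Str.slice l (some 1) none ++ "\n", bc, pc + 1) := by
          unfold pvStepA; rw [hget]; simp
        have he : pvEmit "+" l = PySem.Str.slice l (some 1) none ++ "\n" := by
          unfold pvEmit; rw [hsp]; simp
        obtain ⟨ih1, ih2⟩ := ih hrest b (p ++ PySem.Str.slice l (some 1) none ++ "\n") bc (pc + 1)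
        rw [List.foldl_cons, hstep]
        exact ⟨by rw [ih1, hfp],
               by rw [ih2, hfm, List.map_cons, pvJoinEmptyCons, he]; simp [pvStrAppendAssoc]⟩
      · have hbp : (c == '+') = false := beq_eq_false_iff_ne.mpr hc2
        have hbm : (c == '-') = false := beq_eq_false_iff_ne.mpr hc1
        have hfp : (l :: ls).filter (fun x => ! PySem.Str.startswith x "+")
            = l :: ls.filter (fun x => ! PySem.Str.startswith x "+") := by
          rw [List.filter_cons, hsp, hbp]; simp
        have hfm : (l :: ls).filter (fun x => ! PySem.Str.startswith x "-")
            = l :: ls.filter (fun x => ! PySem.Str.startswith x "-") := by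
          rw [List.filter_cons, hsm, hbm]; simp
        have hstep : pvStepA (b, p, bc, pc) l = (b ++ l ++ "\n", p ++ l ++ "\n", bc, pc) := by
          unfold pvStepA; rw [hget]; simp [hc1, hc2]
        have he1 : pvEmit "-" l = l ++ "\n" := by unfold pvEmit; rw [hsm, hbm]; simp
        have he2 : pvEmit "+" l = l ++ "\n" := by unfold pvEmit; rw [hsp, hbp]; simp
        obtain ⟨ih1, ih2⟩ := ih hrest (b ++ l ++ "\n") (p ++ l ++ "\n") bc pc
        rw [List.foldl_cons, hstep]
        exact ⟨by rw [ih1, hfp, List.map_cons, pvJoinEmptyCons, he1]; simp [pvStrAppendAssoc],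
               by rw [ih2, hfm, List.map_cons, pvJoinEmptyCons, he2]; simp [pvStrAppendAssoc]⟩

-- ===== VERDICT (by name: the statement is the Claim_ definition above) =====
theorem separate_buggy_and_patched_spec : Claim_equal_separate_buggy_and_patched := by
  intro s _ hpre
  unfold Spec_separate_buggy_and_patched
  unfold separate_buggy_and_patched separate_buggy_and_patched_alt
  obtain ⟨h1, h2⟩ := pvLoop (PySem.Str.splitlines s) hpre "" "" 0 0
  simp only at h1 h2 ⊢
  exact Prod.ext (by rw [h1, pvStrEmptyAppend]) (by rw [h2, pvStrEmptyAppend])
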